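-- pv_equiv track=rewrite | github.com/Eslam-Aly/N-Queen-Solver | hill_climbing_solver.py | get_best_swap
-- ===== SOURCE A (Python) =====
-- def count_conflicts(queen_cols):
--     conflicts = 0
--     n = len(queen_cols)
--     for i in range(n):
--         for j in range(i + 1, n):
--             if abs(i - j) == abs(queen_cols[i] - queen_cols[j]):
--                 conflicts += 1
--     return conflicts
--
-- def get_best_swap(queen_cols):
--     n = len(queen_cols)
--     current_conflicts = count_conflicts(queen_cols)
--     best_conflicts = current_conflicts
--     best_swap = None
--
--     for i in range(n):
--         for j in range(i + 1, n):
--             queen_cols[i], queen_cols[j] = queen_cols[j], queen_cols[i]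
--             new_conflicts = count_conflicts(queen_cols)
--             queen_cols[i], queen_cols[j] = queen_cols[j], queen_cols[i]
--
--             if new_conflicts < best_conflicts:
--                 best_conflicts = new_conflicts
--                 best_swap = (i, j)
--
--     return best_swap, best_conflicts
-- ===== SOURCE B (Python) =====
-- def get_best_swap(queen_cols):
--     # Delta evaluation: instead of recounting all O(n^2) pairs for every candidate
--     # swap, precompute each queen's conflict degree once and, per swap, recount in
--     # O(n) only the conflicts touching the two swapped positions.
--     n = len(queen_cols)
--
--     current = 0
--     for i in range(n):
--         for j in range(i + 1, n):
--             if abs(i - j) == abs(queen_cols[i] - queen_cols[j]):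
--                 current += 1
--
--     # degree[x] = number of other queens in (diagonal) conflict with queen x
--     degree = []
--     for x in range(n):
--         d = 0
--         for k in range(n):
--             if k != x and abs(k - x) == abs(queen_cols[k] - queen_cols[x]):
--                 d += 1
--         degree.append(d)
--
--     best_conflicts = current
--     best_swap = None
--     for i in range(n):
--         ci = queen_cols[i]
--         for j in range(i + 1, n):
--             cj = queen_cols[j]
--             pair = 1 if abs(i - j) == abs(ci - cj) else 0
--             before = degree[i] + degree[j] - pair  # conflicts touching i or j now
--             after = pair  # |ci - cj| is unchanged by the swap
--             for k in range(n):
--                 if k != i and k != j: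
--                     ck = queen_cols[k]
--                     if abs(k - i) == abs(ck - cj):
--                         after += 1
--                     if abs(k - j) == abs(ck - ci):
--                         after += 1
--             new_conflicts = current - before + after
--             if new_conflicts < best_conflicts:
--                 best_conflicts = new_conflicts
--                 best_swap = (i, j)
--     return best_swap, best_conflicts
-- ===== Notes on version B (the rewrite author's own statement) =====
-- stated objective: faster
-- what changed: Instead of recounting all O(n^2) pairs for every candidate swap, B evaluates each swap by a delta: it recounts only the conflicts touching positions i and j before and after the swap (O(n) per pair), keeping the same first-strict-improvement tie-breaking.
import Mathlib
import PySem

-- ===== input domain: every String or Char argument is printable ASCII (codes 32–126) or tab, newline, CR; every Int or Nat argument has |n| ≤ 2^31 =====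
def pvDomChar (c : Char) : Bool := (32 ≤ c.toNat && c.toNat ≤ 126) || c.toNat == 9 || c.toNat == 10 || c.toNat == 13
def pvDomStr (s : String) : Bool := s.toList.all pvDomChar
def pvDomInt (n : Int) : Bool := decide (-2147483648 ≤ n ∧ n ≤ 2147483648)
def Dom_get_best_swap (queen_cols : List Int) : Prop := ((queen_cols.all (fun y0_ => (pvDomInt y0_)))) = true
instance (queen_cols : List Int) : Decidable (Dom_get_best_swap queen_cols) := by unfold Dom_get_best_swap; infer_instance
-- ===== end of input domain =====

-- B evaluates each candidate swap by an O(n) delta (precomputed conflict degrees plus a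
-- recount of only the conflicts touching the two swapped positions) instead of A's full
-- O(n^2) recount per swap (objective: faster).
-- A temporarily mutates its argument but restores it before returning; return values are compared.

-- ===== PORT A =====
-- the in-place double assignment queen_cols[i], queen_cols[j] = queen_cols[j], queen_cols[i]
def pySwap (q : List Int) (i j : Nat) : List Int := (q.set i (q.getD j 0)).set j (q.getD i 0)


def count_conflicts (queen_cols : List Int) : Int :=
  let n := queen_cols.length
  (List.range n).foldl (fun conflicts (i : Nat) =>
    (List.range' (i+1) (n - (i+1))).foldl (fun conflicts (j : Nat) =>
      if |(i : Int) - (j : Int)| = |queen_cols.getD i 0 - queen_cols.getD j 0|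
      then conflicts + 1 else conflicts) conflicts) 0



def get_best_swap (queen_cols : List Int) : (Option (Int × Int)) × Int :=
  let n := queen_cols.length
  let current_conflicts := count_conflicts queen_cols
  (List.range n).foldl (fun st (i : Nat) =>
    (List.range' (i+1) (n - (i+1))).foldl (fun st (j : Nat) =>
      let q' := pySwap queen_cols i j
      let new_conflicts := count_conflicts q'
      if new_conflicts < st.2 then (some ((i:Int), (j:Int)), new_conflicts) else st) st)
    ((none : Option (Int × Int)), current_conflicts)


-- ===== PORT B =====
def get_best_swap_alt (queen_cols : List Int) : (Option (Int × Int)) × Int :=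
  let n := queen_cols.length
  let current := (List.range n).foldl (fun c (i : Nat) =>
    (List.range' (i+1) (n - (i+1))).foldl (fun c (j : Nat) =>
      if |(i : Int) - (j : Int)| = |queen_cols.getD i 0 - queen_cols.getD j 0|
      then c + 1 else c) c) 0
  let degree := (List.range n).foldl (fun acc (x : Nat) =>
    acc ++ [(List.range n).foldl (fun d (k : Nat) =>
      if k ≠ x ∧ |(k:Int) - (x:Int)| = |queen_cols.getD k 0 - queen_cols.getD x 0|
      then d + 1 else d) (0:Int)]) []
  (List.range n).foldl (fun st (i : Nat) =>
    let ci := queen_cols.getD i 0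
    (List.range' (i+1) (n - (i+1))).foldl (fun st (j : Nat) =>
      let cj := queen_cols.getD j 0
      let pair : Int := if |(i:Int) - (j:Int)| = |ci - cj| then 1 else 0
      let before := degree.getD i 0 + degree.getD j 0 - pair
      let after := (List.range n).foldl (fun t (k : Nat) =>
        if k ≠ i ∧ k ≠ j then
          let ck := queen_cols.getD k 0
          let t := if |(k:Int) - (i:Int)| = |ck - cj| then t + 1 else t
          if |(k:Int) - (j:Int)| = |ck - ci| then t + 1 else t
        else t) pair
      let new_conflicts := current - before + after
      if new_conflicts < st.2 then (some ((i:Int), (j:Int)), new_conflicts) else st) st)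
    ((none : Option (Int × Int)), current)


-- ===== PRECONDITION & SPEC =====
def Spec_get_best_swap (queen_cols : List Int) (out : (Option (Int × Int)) × Int) : Prop := out = get_best_swap_alt queen_cols
instance (queen_cols : List Int) (out : (Option (Int × Int)) × Int) : Decidable (Spec_get_best_swap queen_cols out) := by unfold Spec_get_best_swap; infer_instance

-- ===== CLAIM (what is proved, stated in full; the proofs are below) =====
def Claim_equal_get_best_swap : Prop := ∀ (queen_cols : List Int), Dom_get_best_swap queen_cols → Spec_get_best_swap queen_cols (get_best_swap queen_cols)

-- ===== LEMMAS AND PROOFS =====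
-- gg is the conflict indicator of the pair (a, b); Sf / Cf / Ff are Finset characterisations
-- of the programs' counters (full triangle, one column, full square).
def gg (q : List Int) (a b : Nat) : Int :=
  if |(a:Int) - (b:Int)| = |q.getD a 0 - q.getD b 0| then 1 else 0

def Sf (n : Nat) (q : List Int) : Int := ∑ a ∈ Finset.range n, ∑ b ∈ Finset.Ico (a+1) n, gg q a b
def Cf (n : Nat) (q : List Int) (x : Nat) : Int := ∑ k ∈ Finset.range n, gg q k x
def Ff (n : Nat) (q : List Int) : Int := ∑ a ∈ Finset.range n, ∑ b ∈ Finset.range n, gg q a b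

lemma gg_symm (q : List Int) (a b : Nat) : gg q a b = gg q b a := by
  unfold gg; rw [abs_sub_comm ((a:Int)), abs_sub_comm (q.getD a 0)]

lemma gg_diag (q : List Int) (a : Nat) : gg q a a = 1 := by simp [gg]

lemma foldl_sum (step : Int → Nat → Int) (f : Nat → Int) (l : List Nat) (c : Int)
    (h : ∀ c x, x ∈ l → step c x = c + f x) :
    l.foldl step c = c + (l.map f).sum := by
  induction l generalizing c with
  | nil => simp
  | cons a as ih =>
    rw [List.foldl_cons, h _ _ (List.mem_cons_self), List.map_cons, List.sum_cons,
      ih _ (fun c x hx => h c x (List.mem_cons_of_mem _ hx))]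
    ring

lemma map_sum_range (n : Nat) (f : Nat → Int) :
    ((List.range n).map f).sum = ∑ x ∈ Finset.range n, f x := by
  induction n with
  | zero => simp
  | succ n ih => rw [List.range_succ, Finset.sum_range_succ]; simp [ih]

lemma map_sum_range' (s l : Nat) (f : Nat → Int) :
    ((List.range' s l).map f).sum = ∑ x ∈ Finset.Ico s (s+l), f x := by
  rw [List.range'_eq_map_range, List.map_map, map_sum_range,
    Finset.sum_Ico_eq_sum_range]
  simp [Function.comp]

lemma tri (f : Nat → Nat → Int) (n : Nat) :
    ∑ a ∈ Finset.range n, ∑ b ∈ Finset.range a, f a b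
      = ∑ b ∈ Finset.range n, ∑ a ∈ Finset.Ico (b+1) n, f a b := by
  induction n with
  | zero => simp
  | succ n ih =>
    rw [Finset.sum_range_succ, ih, Finset.sum_range_succ]
    have h1 : ∀ b ∈ Finset.range n, ∑ a ∈ Finset.Ico (b+1) (n+1), f a b
        = (∑ a ∈ Finset.Ico (b+1) n, f a b) + f n b := by
      intro b hb
      exact Finset.sum_Ico_succ_top (by simpa using Nat.lt_of_lt_of_le (Finset.mem_range.mp hb) (le_refl n)) _
    rw [Finset.sum_congr rfl h1, Finset.sum_add_distrib]
    have h2 : ∑ a ∈ Finset.Ico (n+1) (n+1), f a n = 0 := by simp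
    rw [h2]
    ring

lemma F_eq (n : Nat) (q : List Int) : Ff n q = 2 * Sf n q + n := by
  unfold Ff Sf
  have h1 : ∀ a ∈ Finset.range n, ∑ b ∈ Finset.range n, gg q a b
      = (∑ b ∈ Finset.range a, gg q a b) + gg q a a + ∑ b ∈ Finset.Ico (a+1) n, gg q a b := by
    intro a ha
    have ha' : a < n := Finset.mem_range.mp ha
    rw [Finset.range_eq_Ico, ← Finset.sum_Ico_consecutive _ (Nat.zero_le a) (Nat.le_of_lt ha'),
      Finset.sum_eq_sum_Ico_succ_bot ha', ← Finset.range_eq_Ico]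
    ring
  rw [Finset.sum_congr rfl h1, Finset.sum_add_distrib, Finset.sum_add_distrib, tri]
  have h2 : ∑ b ∈ Finset.range n, ∑ a ∈ Finset.Ico (b+1) n, gg q b a
      = ∑ b ∈ Finset.range n, ∑ a ∈ Finset.Ico (b+1) n, gg q a b :=
    Finset.sum_congr rfl (fun b _ => Finset.sum_congr rfl (fun a _ => gg_symm q b a))
  rw [← h2]
  have h3 : ∑ a ∈ Finset.range n, gg q a a = (n:Int) := by
    rw [Finset.sum_congr rfl (fun a _ => gg_diag q a)]
    simp
  rw [h3]
  ring

lemma getD_pySwap (q : List Int) (i j : Nat) (hi : i < q.length) (hj : j < q.length) (k : Nat) :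
    (pySwap q i j).getD k 0 = if k = j then q.getD i 0 else if k = i then q.getD j 0 else q.getD k 0 := by
  unfold pySwap
  rcases Nat.lt_or_ge k q.length with hk | hk
  · by_cases hkj : k = j
    · subst hkj
      simp [List.getD_eq_getElem?_getD, hk]
    · by_cases hki : k = i
      · subst hki
        simp [List.getD_eq_getElem?_getD, hk, hkj, Ne.symm hkj]
      · simp [List.getD_eq_getElem?_getD, hki, hkj, Ne.symm hki, Ne.symm hkj]
  · have hki : k ≠ i := by omega
    have hkj : k ≠ j := by omega
    simp [List.getD_eq_getElem?_getD, hki, hkj, Ne.symm hki, Ne.symm hkj]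

lemma length_pySwap (q : List Int) (i j : Nat) : (pySwap q i j).length = q.length := by
  simp [pySwap]

lemma gg_swap_out (q : List Int) (i j : Nat) (hi : i < q.length) (hj : j < q.length)
    (a b : Nat) (hai : a ≠ i) (haj : a ≠ j) (hbi : b ≠ i) (hbj : b ≠ j) :
    gg (pySwap q i j) a b = gg q a b := by
  unfold gg
  rw [getD_pySwap q i j hi hj a, getD_pySwap q i j hi hj b]
  simp [hai, haj, hbi, hbj]

lemma gg_swap_pair (q : List Int) (i j : Nat) (hi : i < q.length) (hj : j < q.length) (hij : i ≠ j) :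
    gg (pySwap q i j) i j = gg q i j := by
  unfold gg
  rw [getD_pySwap q i j hi hj i, getD_pySwap q i j hi hj j]
  simp [hij]
  rw [abs_sub_comm (q[j]?.getD 0) (q[i]?.getD 0)]

lemma row_split (n i j : Nat) (f : Nat → Int) (hi : i < n) (hj : j < n) (hij : i ≠ j)
    (h0 : ∀ b, b < n → b ≠ i → b ≠ j → f b = 0) :
    ∑ b ∈ Finset.range n, f b = f i + f j := by
  have hmi : i ∈ Finset.range n := Finset.mem_range.mpr hi
  have hmj : j ∈ (Finset.range n).erase i := Finset.mem_erase.mpr ⟨Ne.symm hij, Finset.mem_range.mpr hj⟩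
  rw [← Finset.add_sum_erase _ f hmi, ← Finset.add_sum_erase _ f hmj]
  have hz : ∑ b ∈ ((Finset.range n).erase i).erase j, f b = 0 := by
    apply Finset.sum_eq_zero
    intro b hb
    simp only [Finset.mem_erase, Finset.mem_range] at hb
    exact h0 b hb.2.2 hb.2.1 hb.1
  rw [hz]; ring

lemma F_diff (q : List Int) (i j : Nat) (hij : i < j) (hj : j < q.length) :
    Ff q.length (pySwap q i j) - Ff q.length q
      = 2 * ((Cf q.length (pySwap q i j) i - Cf q.length q i)
           + (Cf q.length (pySwap q i j) j - Cf q.length q j)) := by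
  set n := q.length with hn
  set q' := pySwap q i j with hq'
  have hi : i < q.length := lt_trans hij hj
  have hne : i ≠ j := Nat.ne_of_lt hij
  have hout : ∀ a b, a ≠ i → a ≠ j → b ≠ i → b ≠ j → gg q' a b - gg q a b = 0 := by
    intro a b h1 h2 h3 h4; rw [gg_swap_out q i j hi hj a b h1 h2 h3 h4]; ring
  have hpair : gg q' i j - gg q i j = 0 := by
    rw [gg_swap_pair q i j hi hj hne]; ring
  have hpair' : gg q' j i - gg q j i = 0 := by
    rw [gg_symm q' j i, gg_symm q j i]; exact hpair
  have hdiagi : gg q' i i - gg q i i = 0 := by rw [gg_diag, gg_diag]; ring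
  have hdiagj : gg q' j j - gg q j j = 0 := by rw [gg_diag, gg_diag]; ring
  have colsum : ∀ x, (∑ a ∈ Finset.range n, (gg q' a x - gg q a x)) = Cf n q' x - Cf n q x := by
    intro x; unfold Cf; rw [Finset.sum_sub_distrib]
  unfold Ff
  rw [← Finset.sum_sub_distrib]
  have hrows : ∀ a ∈ Finset.range n,
      (∑ b ∈ Finset.range n, gg q' a b) - ∑ b ∈ Finset.range n, gg q a b
        = ∑ b ∈ Finset.range n, (gg q' a b - gg q a b) := by
    intro a _; rw [Finset.sum_sub_distrib]
  rw [Finset.sum_congr rfl hrows]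
  have hrowval : ∀ a ∈ Finset.range n,
      ∑ b ∈ Finset.range n, (gg q' a b - gg q a b)
        = (if a = i then Cf n q' i - Cf n q i else if a = j then Cf n q' j - Cf n q j
           else (gg q' a i - gg q a i) + (gg q' a j - gg q a j)) := by
    intro a ha
    by_cases hai : a = i
    · subst hai
      rw [if_pos rfl]
      rw [Finset.sum_congr rfl (fun b _ => by rw [gg_symm q' a b, gg_symm q a b]), colsum a]
    · rw [if_neg hai]
      by_cases haj : a = j
      · subst haj
        rw [if_pos rfl]
        rw [Finset.sum_congr rfl (fun b _ => by rw [gg_symm q' a b, gg_symm q a b]), colsum a]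
      · rw [if_neg haj]
        exact row_split n i j _ hi hj hne (fun b _ hbi hbj => hout a b hai haj hbi hbj)
  rw [Finset.sum_congr rfl hrowval]
  have hmi : i ∈ Finset.range n := Finset.mem_range.mpr hi
  have hmj : j ∈ (Finset.range n).erase i := Finset.mem_erase.mpr ⟨Ne.symm hne, Finset.mem_range.mpr hj⟩
  rw [← Finset.add_sum_erase _ _ hmi, ← Finset.add_sum_erase _ _ hmj]
  rw [if_pos rfl, if_neg (Ne.symm hne), if_pos rfl]
  have step1 : ∑ a ∈ ((Finset.range n).erase i).erase j,
      (if a = i then Cf n q' i - Cf n q i else if a = j then Cf n q' j - Cf n q j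
       else (gg q' a i - gg q a i) + (gg q' a j - gg q a j))
      = ∑ a ∈ ((Finset.range n).erase i).erase j,
        ((gg q' a i - gg q a i) + (gg q' a j - gg q a j)) := by
    apply Finset.sum_congr rfl
    intro a ha
    simp only [Finset.mem_erase] at ha
    simp [ha.1, ha.2.1]
  rw [step1, Finset.sum_add_distrib]
  have coli : ∑ a ∈ ((Finset.range n).erase i).erase j, (gg q' a i - gg q a i)
      = Cf n q' i - Cf n q i := by
    have e1 := (Finset.add_sum_erase _ (fun a => gg q' a i - gg q a i) hmi).symm
    have e2 := (Finset.add_sum_erase _ (fun a => gg q' a i - gg q a i) hmj).symm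
    simp only at e1 e2
    have e3 := colsum i
    linarith [e1, e2, e3, hdiagi, hpair']
  have colj : ∑ a ∈ ((Finset.range n).erase i).erase j, (gg q' a j - gg q a j)
      = Cf n q' j - Cf n q j := by
    have e1 := (Finset.add_sum_erase _ (fun a => gg q' a j - gg q a j) hmi).symm
    have e2 := (Finset.add_sum_erase _ (fun a => gg q' a j - gg q a j) hmj).symm
    simp only at e1 e2
    have e3 := colsum j
    linarith [e1, e2, e3, hdiagj, hpair]
  rw [coli, colj]
  ring

lemma S_swap (q : List Int) (i j : Nat) (hij : i < j) (hj : j < q.length) :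
    Sf q.length (pySwap q i j)
      = Sf q.length q
        - (Cf q.length q i + Cf q.length q j - 2 - gg q i j)
        + (Cf q.length (pySwap q i j) i + Cf q.length (pySwap q i j) j - 2
           - gg (pySwap q i j) i j) := by
  have hi : i < q.length := lt_trans hij hj
  have hne : i ≠ j := Nat.ne_of_lt hij
  have hF := F_diff q i j hij hj
  have h1 : Ff q.length (pySwap q i j) = 2 * Sf q.length (pySwap q i j) + q.length := F_eq _ _
  have h2 : Ff q.length q = 2 * Sf q.length q + q.length := F_eq _ _
  have hpair : gg (pySwap q i j) i j = gg q i j := gg_swap_pair q i j hi hj hne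
  rw [h1, h2] at hF
  rw [hpair]
  linarith [hF]


lemma count_conflicts_eq (q : List Int) : count_conflicts q = Sf q.length q := by
  unfold count_conflicts
  set n := q.length with hn
  have inner : ∀ (c : Int), ∀ i ∈ List.range n,
      (List.range' (i+1) (n - (i+1))).foldl (fun c (j : Nat) =>
        if |(i : Int) - (j : Int)| = |q.getD i 0 - q.getD j 0| then c + 1 else c) c
        = c + ∑ b ∈ Finset.Ico (i+1) n, gg q i b := by
    intro c i hi
    have hi' : i < n := List.mem_range.mp hi
    rw [foldl_sum _ (fun j => gg q i j) _ c (fun c x _ => by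
      unfold gg; dsimp only; split_ifs with h <;> ring)]
    rw [map_sum_range']
    have hsum : (i+1) + (n - (i+1)) = n := by omega
    rw [hsum]
  rw [foldl_sum _ (fun i => ∑ b ∈ Finset.Ico (i+1) n, gg q i b) _ 0
    (fun c i hi => inner c i hi)]
  rw [map_sum_range]
  unfold Sf
  ring

lemma sum_skip1 (n : Nat) (q : List Int) (x : Nat) (hx : x < n) :
    ∑ k ∈ Finset.range n, (if k = x then 0 else gg q k x) = Cf n q x - 1 := by
  have e1 : ∀ k, gg q k x = (if k = x then gg q k x else 0) + (if k = x then 0 else gg q k x) := by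
    intro k; by_cases h : k = x <;> simp [h]
  have e2 : Cf n q x
      = (∑ k ∈ Finset.range n, (if k = x then gg q k x else 0))
        + ∑ k ∈ Finset.range n, (if k = x then 0 else gg q k x) := by
    unfold Cf
    rw [← Finset.sum_add_distrib]
    exact Finset.sum_congr rfl (fun k _ => e1 k)
  rw [Finset.sum_ite_eq' (Finset.range n) x (fun k => gg q k x)] at e2
  simp [Finset.mem_range.mpr hx, gg_diag] at e2
  omega

lemma sum_skip2 (n : Nat) (i j : Nat) (hi : i < n) (hj : j < n) (hij : i ≠ j) (g : Nat → Int) :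
    ∑ k ∈ Finset.range n, (if k = i ∨ k = j then 0 else g k)
      = (∑ k ∈ Finset.range n, g k) - g i - g j := by
  have e1 : ∀ k, g k = (if k = i then g k else 0) + (if k = j then g k else 0)
      + (if k = i ∨ k = j then 0 else g k) := by
    intro k
    by_cases h1 : k = i
    · subst h1; simp [hij]
    · by_cases h2 : k = j
      · subst h2; simp [h1]
      · simp [h1, h2]
  have e2 : ∑ k ∈ Finset.range n, g k
      = (∑ k ∈ Finset.range n, (if k = i then g k else 0))
        + (∑ k ∈ Finset.range n, (if k = j then g k else 0))
        + ∑ k ∈ Finset.range n, (if k = i ∨ k = j then 0 else g k) := by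
    rw [← Finset.sum_add_distrib, ← Finset.sum_add_distrib]
    exact Finset.sum_congr rfl (fun k _ => e1 k)
  rw [Finset.sum_ite_eq' (Finset.range n) i g, Finset.sum_ite_eq' (Finset.range n) j g] at e2
  simp [Finset.mem_range.mpr hi, Finset.mem_range.mpr hj] at e2
  omega

lemma degree_getD (q : List Int) (x : Nat) (hx : x < q.length) :
    ((List.range q.length).foldl (fun acc (y : Nat) =>
       acc ++ [(List.range q.length).foldl (fun d (k : Nat) =>
         if k ≠ y ∧ |(k:Int) - (y:Int)| = |q.getD k 0 - q.getD y 0| then d + 1 else d) (0:Int)]) []).getD x 0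
    = Cf q.length q x - 1 := by
  rw [PySem.List.foldl_append_singleton_eq_map]
  rw [List.nil_append, List.getD_eq_getElem?_getD, List.getElem?_map, List.getElem?_range hx]
  simp only [Option.map_some, Option.getD_some]
  rw [foldl_sum _ (fun k => if k = x then 0 else gg q k x) _ 0 (fun d k _ => by
    unfold gg; dsimp only; split_ifs <;> omega)]
  rw [map_sum_range, sum_skip1 q.length q x hx]
  ring

lemma after_eq (q : List Int) (i j : Nat) (hij : i < j) (hjn : j < q.length) :
    ((List.range q.length).foldl (fun t (k : Nat) =>
        if k ≠ i ∧ k ≠ j then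
          let ck := q.getD k 0
          let t := if |(k:Int) - (i:Int)| = |ck - q.getD j 0| then t + 1 else t
          if |(k:Int) - (j:Int)| = |ck - q.getD i 0| then t + 1 else t
        else t)
      (if |(i:Int) - (j:Int)| = |q.getD i 0 - q.getD j 0| then (1:Int) else 0))
    = Cf q.length (pySwap q i j) i + Cf q.length (pySwap q i j) j - 2 - gg (pySwap q i j) i j := by
  have hin : i < q.length := lt_trans hij hjn
  have hne : i ≠ j := Nat.ne_of_lt hij
  set q' := pySwap q i j with hq'
  have hg1 : ∀ k, k ≠ i → k ≠ j →
      gg q' k i = (if |(k:Int) - (i:Int)| = |q.getD k 0 - q.getD j 0| then 1 else 0) := by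
    intro k hki hkj
    unfold gg
    rw [hq', getD_pySwap q i j hin hjn k, getD_pySwap q i j hin hjn i]
    simp [hki, hkj, hne]
  have hg2 : ∀ k, k ≠ i → k ≠ j →
      gg q' k j = (if |(k:Int) - (j:Int)| = |q.getD k 0 - q.getD i 0| then 1 else 0) := by
    intro k hki hkj
    unfold gg
    rw [hq', getD_pySwap q i j hin hjn k, getD_pySwap q i j hin hjn j]
    simp [hki, hkj]
  rw [foldl_sum _ (fun k => if k = i ∨ k = j then 0 else gg q' k i + gg q' k j) _ _ (fun t k _ => by
    by_cases hki : k = i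
    · simp [hki]
    · by_cases hkj : k = j
      · simp [hkj]
      · dsimp only
        rw [if_pos ⟨hki, hkj⟩, if_neg (by tauto : ¬(k = i ∨ k = j)), hg1 k hki hkj, hg2 k hki hkj]
        split_ifs <;> omega)]
  rw [map_sum_range, sum_skip2 q.length i j hin hjn hne (fun k => gg q' k i + gg q' k j)]
  rw [Finset.sum_add_distrib]
  have hColi : ∑ k ∈ Finset.range q.length, gg q' k i = Cf q.length q' i := rfl
  have hColj : ∑ k ∈ Finset.range q.length, gg q' k j = Cf q.length q' j := rfl
  rw [hColi, hColj]
  have hpair : gg q' i j = gg q i j := gg_swap_pair q i j hin hjn hne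
  have hpair' : gg q' j i = gg q i j := by rw [gg_symm q' j i, hpair]
  have hgii : gg q' i i = 1 := gg_diag q' i
  have hgjj : gg q' j j = 1 := gg_diag q' j
  have hstart : (if |(i:Int) - (j:Int)| = |q.getD i 0 - q.getD j 0| then (1:Int) else 0) = gg q i j := rfl
  rw [hstart, hgii, hgjj, hpair, hpair']
  ring


lemma ports_eq (q : List Int) : get_best_swap q = get_best_swap_alt q := by
  unfold get_best_swap get_best_swap_alt
  dsimp only
  have hcur : (List.range q.length).foldl (fun c (i : Nat) =>
      (List.range' (i+1) (q.length - (i+1))).foldl (fun c (j : Nat) =>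
        if |(i : Int) - (j : Int)| = |q.getD i 0 - q.getD j 0|
        then c + 1 else c) c) 0 = count_conflicts q := rfl
  rw [hcur]
  apply PySem.List.foldl_congr_mem
  intro st i hi
  have hi' : i < q.length := List.mem_range.mp hi
  apply PySem.List.foldl_congr_mem
  intro st' j hj
  have hj' : i + 1 ≤ j ∧ j < (i+1) + (q.length - (i+1)) := List.mem_range'_1.mp hj
  have hij : i < j := by omega
  have hjn : j < q.length := by omega
  have key : ∀ (nc : Int), nc = count_conflicts (pySwap q i j) →
      (if count_conflicts (pySwap q i j) < st'.2
        then (some ((i:Int), (j:Int)), count_conflicts (pySwap q i j)) else st')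
      = (if nc < st'.2 then (some ((i:Int), (j:Int)), nc) else st') := by
    intro nc h; rw [h]
  apply key
  rw [degree_getD q i hi', degree_getD q j hjn, after_eq q i j hij hjn,
    count_conflicts_eq q, count_conflicts_eq (pySwap q i j), length_pySwap]
  have hpairr : (if |(i:Int) - (j:Int)| = |q.getD i 0 - q.getD j 0| then (1:Int) else 0) = gg q i j := rfl
  rw [hpairr]
  have hS := S_swap q i j hij hjn
  linarith [hS]

-- ===== VERDICT (by name: the statement is the Claim_ definition above) =====
theorem get_best_swap_spec : Claim_equal_get_best_swap := by
  intro queen_cols _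
  unfold Spec_get_best_swap
  exact ports_eq queen_cols
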